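-- pv_equiv track=rewrite | github.com/ydb-platform/ydb | contrib/python/adaptix/adaptix/_internal/utils.py | get_prefix_groups
-- ===== SOURCE A (Python) =====
-- from collections.abc import Collection, Generator, Iterable, Iterator, Mapping
-- from typing import Any, Callable, Generic, Protocol, TypeVar, Union, final, overload
--
-- ComparableSeqT = TypeVar("ComparableSeqT", bound="ComparableSequence")
--
-- def get_prefix_groups(
--     values: Collection[ComparableSeqT],
-- ) -> Collection[tuple[ComparableSeqT, Iterable[ComparableSeqT]]]:
--     groups: list[tuple[ComparableSeqT, list[ComparableSeqT]]] = []
--     sorted_values = iter(sorted(values))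
--     current_group: list[ComparableSeqT] = []
--     try:
--         prefix = next(sorted_values)
--     except StopIteration:
--         return []
--
--     for value in sorted_values:
--         if value[:len(prefix)] == prefix:
--             current_group.append(value)
--         else:
--             if current_group:
--                 groups.append((prefix, current_group))
--                 current_group = []
--             prefix = value
--
--     if current_group:
--         groups.append((prefix, current_group))
--     return groups
-- ===== SOURCE B (Python) =====
-- def get_prefix_groups(values):
--     sv = sorted(values)
--     present = set(sv)
--     groups = {}
--     for v in sv:
--         lead = v
--         for k in range(len(v)):
--             if v[:k] in present:
--                 lead = v[:k]
--                 break
--         if lead == v and v not in groups: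
--             groups[v] = []
--         else:
--             groups[lead].append(v)
--     return [(g, run) for g, run in groups.items() if run]
-- ===== Notes on version B (the rewrite author's own statement) =====
-- stated objective: alternative
-- what changed: Replaces A's sequential flush-on-mismatch scan (prefix/current_group state carried across the sorted pass, flushed on mismatch) by a hash-index algorithm: each value's leader is computed independently as its shortest prefix present in set(values), and runs are collected in a dict keyed by leader, filtered to non-empty at the end.
import Mathlib
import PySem

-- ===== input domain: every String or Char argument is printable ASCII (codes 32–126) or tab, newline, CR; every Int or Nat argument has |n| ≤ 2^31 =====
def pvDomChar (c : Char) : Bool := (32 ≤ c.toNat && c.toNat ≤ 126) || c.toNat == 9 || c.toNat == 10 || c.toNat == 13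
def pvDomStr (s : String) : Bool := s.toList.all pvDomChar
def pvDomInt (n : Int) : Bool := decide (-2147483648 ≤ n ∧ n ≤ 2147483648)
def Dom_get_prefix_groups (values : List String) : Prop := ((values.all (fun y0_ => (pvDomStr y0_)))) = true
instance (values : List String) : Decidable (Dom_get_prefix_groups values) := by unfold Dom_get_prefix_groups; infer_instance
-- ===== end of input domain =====

-- B replaces A's sequential flush-on-mismatch scan by a hash-indexed algorithm: each value's
-- group leader is computed independently as its shortest prefix present in set(values), and
-- runs are collected in a dict keyed by leader (alternative algorithm, same cost class).

-- ===== PORT A =====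
-- token for A's `value[:len(prefix)] == prefix` (exact Python slice semantics)
def pvStarts (pfx v : String) : Bool :=
  PySem.Str.slice v none (some (PySem.Str.len pfx)) == pfx

-- A's for-loop: state = (prefix, current_group, groups)
def pvGoA : String → List String → List (String × List String) → List String → List (String × List String)
  | pfx, cur, groups, [] => if cur ≠ [] then groups ++ [(pfx, cur)] else groups
  | pfx, cur, groups, v :: rest =>
    if pvStarts pfx v then
      pvGoA pfx (cur ++ [v]) groups rest
    else if cur ≠ [] then
      pvGoA v [] (groups ++ [(pfx, cur)]) rest
    else
      pvGoA v [] groups rest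

def get_prefix_groups (values : List String) : List (String × List String) :=
  match PySem.List.sorted values (fun x => x) false with
  | [] => []
  | p :: rest => pvGoA p [] [] rest

-- ===== PORT B =====
-- Source B's inner `for k in range(len(v)): if v[:k] in present: lead = v[:k]; break` (else lead = v)
def pvLeadGo (present : PySem.Set String) (v : String) : List Int → String
  | [] => v
  | k :: ks =>
    if present.contains (PySem.Str.slice v none (some k)) then PySem.Str.slice v none (some k)
    else pvLeadGo present v ks

def pvLead (present : PySem.Set String) (v : String) : String :=
  pvLeadGo present v (PySem.List.pyRange 0 (PySem.Str.len v) 1)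

-- Source B's loop body: create the leader's entry, or append v to its leader's run
def pvStepB (present : PySem.Set String) (groups : PySem.Dict String (List String))
    (v : String) : PySem.Dict String (List String) :=
  let lead := pvLead present v
  if lead == v && !(groups.contains v) then groups.insert v []
  else groups.modify lead [] (fun r => r ++ [v])

def get_prefix_groups_alt (values : List String) : List (String × List String) :=
  let sv := PySem.List.sorted values (fun x => x) false
  let present := PySem.Set.ofList sv
  let groups := sv.foldl (pvStepB present) PySem.Dict.empty
  groups.items.filter (fun gr => decide (gr.2 ≠ []))

-- ===== PRECONDITION & SPEC =====
def Spec_get_prefix_groups (values : List String) (out : List (String × List String)) : Prop := out = get_prefix_groups_alt values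
instance (values : List String) (out : List (String × List String)) : Decidable (Spec_get_prefix_groups values out) := by unfold Spec_get_prefix_groups; infer_instance

-- ===== CLAIM (what is proved, stated in full; the proofs are below) =====
def Claim_equal_get_prefix_groups : Prop := ∀ (values : List String), Dom_get_prefix_groups values → Spec_get_prefix_groups values (get_prefix_groups values)

-- ===== LEMMAS AND PROOFS =====

-- lexicographic-order facts about List Char (Python's string order on .toList)
theorem pvConsLeIff (a b : Char) (l m : List Char) :
    (a :: l : List Char) ≤ b :: m ↔ a < b ∨ (a = b ∧ l ≤ m) := by
  rw [le_iff_lt_or_eq, le_iff_lt_or_eq]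
  constructor
  · rintro (h | h)
    · cases h with
      | cons h => exact .inr ⟨rfl, .inl h⟩
      | rel h => exact .inl h
    · injection h with h1 h2; exact .inr ⟨h1, .inr h2⟩
  · rintro (h | ⟨rfl, h | rfl⟩)
    · exact .inl (List.Lex.rel h)
    · exact .inl (List.Lex.cons h)
    · exact .inr rfl

theorem pvNotConsLeNil (a : Char) (l : List Char) : ¬ ((a :: l : List Char) ≤ []) := by
  rw [le_iff_lt_or_eq]; rintro (h | h)
  · cases h
  · simp at h

theorem pvPfxLe (p v : List Char) (h : p <+: v) : p ≤ v := by
  obtain ⟨t, rfl⟩ := h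
  induction p with
  | nil =>
    rw [le_iff_lt_or_eq]
    cases t with
    | nil => right; rfl
    | cons c t => left; exact List.Lex.nil
  | cons c p ih => exact List.cons_le_cons c ih

-- a prefix of v lying between u and v (inclusive) is a prefix of u
theorem pvPfxSandwich (p : List Char) : ∀ (u v : List Char), p <+: v → p ≤ u → u ≤ v → p <+: u := by
  induction p with
  | nil => intro u v _ _ _; exact List.nil_prefix
  | cons c p ih =>
    intro u v hpv hpu huv
    obtain ⟨t, rfl⟩ := hpv
    cases u with
    | nil => exact absurd hpu (pvNotConsLeNil _ _)
    | cons d u' =>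
      rcases (pvConsLeIff ..).1 hpu with h1 | ⟨rfl, h2⟩
      · rcases (pvConsLeIff ..).1 huv with h3 | ⟨h3, h4⟩
        · exact absurd (lt_trans h1 h3) (lt_irrefl _)
        · exact absurd (h3 ▸ h1) (lt_irrefl _)
      · rcases (pvConsLeIff ..).1 huv with h3 | ⟨h3, h4⟩
        · exact absurd h3 (lt_irrefl _)
        · exact (List.cons_prefix_cons).2 ⟨rfl, ih u' _ (List.prefix_append _ _) h2 h4⟩

-- string-level corollaries
theorem pvPfxLeStr (p v : String) (h : p.toList <+: v.toList) : p ≤ v :=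
  String.le_iff_toList_le.2 (pvPfxLe _ _ h)

theorem pvPfxLtStr (p v : String) (h : p.toList <+: v.toList) (hne : p ≠ v) : p < v :=
  lt_of_le_of_ne (pvPfxLeStr p v h) hne

theorem pvPfxSandwichStr (p u v : String) (h : p.toList <+: v.toList) (h1 : p ≤ u) (h2 : u ≤ v) :
    p.toList <+: u.toList :=
  pvPfxSandwich p.toList u.toList v.toList h (String.le_iff_toList_le.1 h1)
    (String.le_iff_toList_le.1 h2)

-- v[:j] as a String, and its bridges
theorem pvSliceToList (v : String) (j : Nat) :
    (PySem.Str.slice v none (some (j : Int))).toList = v.toList.take j := by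
  simp [PySem.List.slice_to (v.toList) (b := (j : Int)) (by exact_mod_cast Nat.zero_le j)]

theorem pvSliceEqIff (v : String) (j : Nat) (q : String) :
    PySem.Str.slice v none (some (j : Int)) = q ↔ v.toList.take j = q.toList := by
  constructor
  · intro h; rw [← h, pvSliceToList]
  · intro h
    exact String.toList_inj.mp (by rw [pvSliceToList, h])

theorem pvStartsIff (p v : String) : pvStarts p v = true ↔ p.toList <+: v.toList := by
  have hlen : PySem.Str.len p = ((p.toList.length : Nat) : Int) := rfl
  rw [pvStarts, beq_iff_eq, hlen, pvSliceEqIff, List.prefix_iff_eq_take, eq_comm]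

theorem pvLeadGoAllFalse (S : PySem.Set String) (v : String) (ks : List Int)
    (h : ∀ k ∈ ks, S.contains (PySem.Str.slice v none (some k)) = false) :
    pvLeadGo S v ks = v := by
  induction ks with
  | nil => rfl
  | cons k ks ih =>
    rw [pvLeadGo, if_neg (by rw [h k (by simp)]; simp), ih (fun k hk => h k (by simp [hk]))]

theorem pvLeadGoFound (S : PySem.Set String) (v : String) :
    ∀ (pre : List Int) (k₀ : Int) (suf : List Int),
    (∀ k ∈ pre, S.contains (PySem.Str.slice v none (some k)) = false) →
    S.contains (PySem.Str.slice v none (some k₀)) = true →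
    pvLeadGo S v (pre ++ k₀ :: suf) = PySem.Str.slice v none (some k₀) := by
  intro pre
  induction pre with
  | nil => intro k₀ suf _ hhit; rw [List.nil_append, pvLeadGo, if_pos hhit]
  | cons k pre ih =>
    intro k₀ suf hpre hhit
    rw [List.cons_append, pvLeadGo, if_neg (by rw [hpre k (by simp)]; simp)]
    exact ih k₀ suf (fun k hk => hpre k (by simp [hk])) hhit

-- pvLead characterisations
theorem pvLeadEqSelf (S : PySem.Set String) (v : String)
    (h : ∀ j : Nat, j < v.toList.length → S.contains (PySem.Str.slice v none (some (j : Int))) = false) :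
    pvLead S v = v := by
  have hlen : PySem.Str.len v = ((v.toList.length : Nat) : Int) := rfl
  rw [pvLead, hlen, PySem.List.pyRange_zero_natCast]
  apply pvLeadGoAllFalse
  intro k hk
  obtain ⟨j, hj, rfl⟩ := List.mem_map.1 hk
  exact h j (List.mem_range.1 hj)

theorem pvLeadEqFound (S : PySem.Set String) (v : String) (j₀ : Nat) (hj : j₀ < v.toList.length)
    (hbelow : ∀ j : Nat, j < j₀ → S.contains (PySem.Str.slice v none (some (j : Int))) = false)
    (hhit : S.contains (PySem.Str.slice v none (some (j₀ : Int))) = true) :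
    pvLead S v = PySem.Str.slice v none (some (j₀ : Int)) := by
  have hlen : PySem.Str.len v = ((v.toList.length : Nat) : Int) := rfl
  rw [pvLead, hlen, PySem.List.pyRange_zero_natCast]
  have hsplit : v.toList.length = j₀ + ((v.toList.length - j₀ - 1) + 1) := by omega
  rw [hsplit, List.range_add, List.range_succ_eq_map]
  rw [List.map_append]
  simp only [List.map_cons, Nat.add_zero]
  apply pvLeadGoFound
  · intro k hk
    obtain ⟨j, hj, rfl⟩ := List.mem_map.1 hk
    exact hbelow j (List.mem_range.1 hj)
  · exact hhit

-- A's accumulator is an append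
theorem pvGoA_groups (l : List String) : ∀ (pfx : String) (cur : List String)
    (groups : List (String × List String)),
    pvGoA pfx cur groups l = groups ++ pvGoA pfx cur [] l := by
  induction l with
  | nil => intro pfx cur groups; by_cases h : cur = [] <;> simp [pvGoA, h]
  | cons v rest ih =>
    intro pfx cur groups
    simp only [pvGoA]
    split_ifs with hs hc
    · exact ih pfx (cur ++ [v]) groups
    · rw [ih v [] (groups ++ [(pfx, cur)]), ih v [] ([] ++ [(pfx, cur)])]
      simp
    · exact ih v [] groups

-- Dict.modify at the last key rewrites the last item in place
theorem pvItemsModifyLast (E : List (String × List String)) (L : String) (cur : List String)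
    (D : PySem.Dict String (List String)) (hD : D.items = E ++ [(L, cur)])
    (hnd : D.keys.Nodup) (f : List String → List String) :
    (D.modify L [] f).items = E ++ [(L, f cur)] := by
  have hkeys : D.keys = E.map Prod.fst ++ [L] := by
    simp only [PySem.Dict.keys, hD, List.map_append, List.map_cons, List.map_nil]
  have hLmem : L ∈ D.keys := by rw [hkeys]; simp
  have hLnotE : L ∉ E.map Prod.fst := by
    rw [hkeys] at hnd
    intro hmem
    rcases List.nodup_append.1 hnd with ⟨_, _, hdisj⟩
    exact hdisj L hmem L (by simp) rfl
  have hget : D.getD L [] = cur :=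
    PySem.Dict.getD_of_mem_items D (by rw [hD]; simp) hnd []
  rw [PySem.Dict.modify, hget,
    PySem.Dict.items_insert_of_contains D _ ((PySem.Dict.contains_iff_mem_keys D L).2 hLmem), hD]
  rw [List.map_append, List.map_cons, List.map_nil]
  congr 1
  · conv_rhs => rw [← List.map_id E]
    apply List.map_congr_left
    intro p hp
    have : p.1 ≠ L := fun h => hLnotE (List.mem_map.2 ⟨p, hp, h⟩)
    simp [this]
  · simp

-- ===== the main loop correspondence =====
theorem pvMain (S : PySem.Set String) :
    ∀ (todo : List String) (E : List (String × List String)) (L : String) (cur : List String)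
      (D : PySem.Dict String (List String)),
      D.items = E ++ [(L, cur)] →
      D.keys.Nodup →
      (∀ k ∈ D.keys, k ∈ S) →
      (∀ k ∈ D.keys, ∀ q ∈ S, q.toList <+: k.toList → q = k) →
      (∀ k ∈ D.keys, k ≤ L) →
      (∀ q ∈ S, L.toList <+: q.toList ∨ q ≤ L ∨ q ∈ todo) →
      (∀ u ∈ todo, L ≤ u) →
      (∀ u ∈ todo, u ∈ S) →
      todo.Pairwise (· ≤ ·) →
      ((todo.foldl (pvStepB S) D).items).filter (fun x => decide (x.2 ≠ [])) =
        E.filter (fun x => decide (x.2 ≠ [])) ++ pvGoA L cur [] todo := by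
  intro todo
  induction todo with
  | nil =>
    intro E L cur D hD _ _ _ _ _ _ _ _
    rw [List.foldl_nil, hD, List.filter_append]
    by_cases hc : cur = [] <;> simp [pvGoA, hc]
  | cons v rest ih =>
    intro E L cur D hD hnd hkS hmin hkle hI5 hLle htS hsorted
    have hkeys : D.keys = E.map Prod.fst ++ [L] := by
      simp only [PySem.Dict.keys, hD, List.map_append, List.map_cons, List.map_nil]
    have hLkey : L ∈ D.keys := by rw [hkeys]; simp
    have hvS : v ∈ S := htS v (by simp)
    have hLv : L ≤ v := hLle v (by simp)
    have hLS : L ∈ S := hkS L hLkey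
    have hminL := hmin L hLkey
    have hheadrest : ∀ u ∈ rest, v ≤ u := (List.pairwise_cons.1 hsorted).1
    have htailsorted := (List.pairwise_cons.1 hsorted).2
    by_cases hp : L.toList <+: v.toList
    · -- v continues the current group
      have hlead : pvLead S v = L := by
        by_cases hvL : v = L
        · subst hvL
          apply pvLeadEqSelf
          intro j hj
          by_contra hcon
          have hqS : PySem.Str.slice v none (some (j : Int)) ∈ S :=
            (PySem.Set.contains_iff S _).1 (by revert hcon; cases S.contains (PySem.Str.slice v none (some (j : Int))) <;> simp)
          have hqpfx : (PySem.Str.slice v none (some (j : Int))).toList <+: v.toList := by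
            rw [pvSliceToList]; exact List.take_prefix j v.toList
          have hqe := hminL _ hqS hqpfx
          have hlen := congrArg (fun s => s.toList.length) hqe
          simp only [pvSliceToList, List.length_take] at hlen
          omega
        · have hj₀ : L.toList.length < v.toList.length := by
            rcases Nat.lt_or_ge L.toList.length v.toList.length with h | h
            · exact h
            · exact absurd (String.toList_inj.1 (hp.eq_of_length
                (Nat.le_antisymm hp.length_le h))) (Ne.symm hvL)
          have htake : v.toList.take L.toList.length = L.toList :=
            ((List.prefix_iff_eq_take.1 hp).symm)
          have hhit : S.contains (PySem.Str.slice v none (some (L.toList.length : Int))) = true := by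
            rw [(pvSliceEqIff v L.toList.length L).2 htake]
            exact (PySem.Set.contains_iff S L).2 hLS
          have hbelow : ∀ j : Nat, j < L.toList.length →
              S.contains (PySem.Str.slice v none (some (j : Int))) = false := by
            intro j hjlt
            by_contra hcon
            have hqS : PySem.Str.slice v none (some (j : Int)) ∈ S :=
              (PySem.Set.contains_iff S _).1 (by revert hcon; cases S.contains (PySem.Str.slice v none (some (j : Int))) <;> simp)
            have hqpfx : (PySem.Str.slice v none (some (j : Int))).toList <+: L.toList := by
              rw [pvSliceToList, ← htake]
              exact List.take_prefix_take_left (Nat.le_of_lt hjlt)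
            have hqL := hminL _ hqS hqpfx
            have hlen := congrArg (fun s => s.toList.length) hqL
            simp only [pvSliceToList, List.length_take] at hlen
            omega
          rw [pvLeadEqFound S v L.toList.length hj₀ hbelow hhit]
          exact (pvSliceEqIff v L.toList.length L).2 htake
      have hstep : pvStepB S D v = D.modify L [] (fun r => r ++ [v]) := by
        have hz : pvStepB S D v = (if (pvLead S v == v && !(D.contains v)) = true then D.insert v []
            else D.modify (pvLead S v) [] (fun r => r ++ [v])) := rfl
        rw [hz, hlead]
        by_cases hvL : v = L
        · subst hvL
          rw [(PySem.Dict.contains_iff_mem_keys D v).2 hLkey]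
          simp
        · have hbe : (L == v) = false := by simp [Ne.symm hvL]
          rw [hbe]
          simp
      have hD' := pvItemsModifyLast E L cur D hD hnd (fun r => r ++ [v])
      have hkeys' : (D.modify L [] (fun r => r ++ [v])).keys = D.keys := by
        rw [PySem.Dict.keys_modify]
        exact PySem.Dict.keys_insert_of_contains D _ ((PySem.Dict.contains_iff_mem_keys D L).2 hLkey)
      rw [List.foldl_cons, hstep]
      have := ih E L (cur ++ [v]) (D.modify L [] (fun r => r ++ [v])) hD'
        (by rw [hkeys']; exact hnd)
        (by rw [hkeys']; exact hkS)
        (by rw [hkeys']; exact hmin)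
        (by rw [hkeys']; exact hkle)
        (by
          intro q hq
          rcases hI5 q hq with h1 | h2 | h3
          · exact Or.inl h1
          · exact Or.inr (Or.inl h2)
          · rcases List.mem_cons.1 h3 with rfl | h4
            · exact Or.inl hp
            · exact Or.inr (Or.inr h4))
        (fun u hu => hLle u (by simp [hu]))
        (fun u hu => htS u (by simp [hu]))
        htailsorted
      rw [this]
      have hs : pvStarts L v = true := (pvStartsIff L v).2 hp
      rw [pvGoA, if_pos hs]
    · -- v starts a new group
      have hnopfx : ∀ q ∈ S, q.toList <+: v.toList → q = v := by
        intro q hq hpq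
        by_contra hne
        have hqlt : q < v := pvPfxLtStr _ _ hpq hne
        rcases hI5 q hq with h1 | h2 | h3
        · exact hp (h1.trans hpq)
        · have hqL : q.toList <+: L.toList := pvPfxSandwichStr q L v hpq h2 hLv
          have := hminL q hq hqL
          subst this
          exact hp hpq
        · rcases List.mem_cons.1 h3 with rfl | h4
          · exact hne rfl
          · exact absurd hqlt (not_lt.2 (hheadrest q h4))
      have hlead : pvLead S v = v := by
        apply pvLeadEqSelf
        intro j hj
        by_contra hcon
        have hqS : PySem.Str.slice v none (some (j : Int)) ∈ S :=
          (PySem.Set.contains_iff S _).1 (by revert hcon; cases S.contains (PySem.Str.slice v none (some (j : Int))) <;> simp)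
        have hqpfx : (PySem.Str.slice v none (some (j : Int))).toList <+: v.toList := by
          rw [pvSliceToList]; exact List.take_prefix j v.toList
        have := hnopfx _ hqS hqpfx
        have hlen := congrArg (fun s => s.toList.length) this
        simp only [pvSliceToList, List.length_take] at hlen
        omega
      have hvnotkey : v ∉ D.keys := by
        intro hvk
        have hveq : v = L := le_antisymm (hkle v hvk) hLv
        exact hp (hveq ▸ List.prefix_refl v.toList)
      have hcontains : D.contains v = false := by
        cases hc : D.contains v
        · rfl
        · exact absurd ((PySem.Dict.contains_iff_mem_keys D v).1 hc) hvnotkey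
      have hstep : pvStepB S D v = D.insert v [] := by
        have hz : pvStepB S D v = (if (pvLead S v == v && !(D.contains v)) = true then D.insert v []
            else D.modify (pvLead S v) [] (fun r => r ++ [v])) := rfl
        rw [hz, hlead, hcontains]
        simp
      have hD' : (D.insert v []).items = (E ++ [(L, cur)]) ++ [(v, [])] := by
        rw [PySem.Dict.items_insert_of_not_contains D _ hcontains, hD]
      have hkeys' : (D.insert v []).keys = D.keys ++ [v] :=
        PySem.Dict.keys_insert_of_not_contains D _ hcontains
      rw [List.foldl_cons, hstep]
      have := ih (E ++ [(L, cur)]) v [] (D.insert v []) hD'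
        (by
          rw [hkeys']
          exact List.nodup_append.2 ⟨hnd, List.nodup_singleton v,
            by intro a ha b hb; simp at hb; subst hb; exact fun h => hvnotkey (h ▸ ha)⟩)
        (by
          rw [hkeys']
          intro k hk
          rcases List.mem_append.1 hk with h | h
          · exact hkS k h
          · simp at h; subst h; exact hvS)
        (by
          rw [hkeys']
          intro k hk q hq hpq
          rcases List.mem_append.1 hk with h | h
          · exact hmin k h q hq hpq
          · simp at h; subst h; exact hnopfx q hq hpq)
        (by
          rw [hkeys']
          intro k hk
          rcases List.mem_append.1 hk with h | h
          · exact le_trans (hkle k h) hLv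
          · simp at h; subst h; exact le_refl _)
        (by
          intro q hq
          rcases hI5 q hq with h1 | h2 | h3
          · right; left
            by_contra hqv
            have hvq : v ≤ q := le_of_lt (not_le.1 hqv)
            exact hp (pvPfxSandwichStr L v q h1 hLv hvq)
          · exact Or.inr (Or.inl (le_trans h2 hLv))
          · rcases List.mem_cons.1 h3 with rfl | h4
            · exact Or.inr (Or.inl (le_refl q))
            · exact Or.inr (Or.inr h4))
        hheadrest
        (fun u hu => htS u (by simp [hu]))
        htailsorted
      rw [this]
      have hs : pvStarts L v = false := by
        cases hb : pvStarts L v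
        · rfl
        · exact absurd ((pvStartsIff L v).1 hb) hp
      rw [pvGoA, if_neg (by simp [hs])]
      rw [List.filter_append]
      by_cases hc : cur = []
      · subst hc
        simp
      · rw [if_pos hc, pvGoA_groups rest v [] ([] ++ [(L, cur)])]
        simp [hc]

-- ===== VERDICT (by name: the statement is the Claim_ definition above) =====
theorem get_prefix_groups_spec : Claim_equal_get_prefix_groups := by
  intro values _
  unfold Spec_get_prefix_groups
  cases h : PySem.List.sorted values (fun x => x) false with
  | nil =>
    simp only [get_prefix_groups, get_prefix_groups_alt, h]
    rfl
  | cons p rest =>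
    have hA : get_prefix_groups values = pvGoA p [] [] rest := by
      simp only [get_prefix_groups, h]
    have hB : get_prefix_groups_alt values =
        (((p :: rest).foldl (pvStepB (PySem.Set.ofList (p :: rest))) PySem.Dict.empty).items).filter
          (fun gr => decide (gr.2 ≠ [])) := by
      simp only [get_prefix_groups_alt, h]
    rw [hA, hB]
    have hsp : List.Pairwise (fun a b => a ≤ b) (p :: rest) := by
      have hpw := PySem.List.sorted_pairwise values (fun x => x)
      rw [h] at hpw; exact hpw
    have hmem : ∀ q, q ∈ PySem.Set.ofList (p :: rest) ↔ q ∈ p :: rest :=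
      fun q => PySem.Set.mem_ofList _ q
    have hminhead : ∀ q ∈ (p :: rest : List String), p ≤ q := by
      intro q hq
      exact PySem.List.key_head_sorted_le values (fun x => x) h q
        ((PySem.List.mem_sorted values (fun x => x) false q).1 (h ▸ hq))
    have hnopfx : ∀ q ∈ PySem.Set.ofList (p :: rest), q.toList <+: p.toList → q = p := by
      intro q hq hpq
      exact le_antisymm (pvPfxLeStr _ _ hpq) (hminhead q ((hmem q).1 hq))
    have hlead : pvLead (PySem.Set.ofList (p :: rest)) p = p := by
      apply pvLeadEqSelf
      intro j hj
      by_contra hcon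
      have hqS : PySem.Str.slice p none (some (j : Int)) ∈ PySem.Set.ofList (p :: rest) :=
        (PySem.Set.contains_iff _ _).1 (by
          revert hcon
          cases (PySem.Set.ofList (p :: rest)).contains (PySem.Str.slice p none (some (j : Int))) <;> simp)
      have hqpfx : (PySem.Str.slice p none (some (j : Int))).toList <+: p.toList := by
        rw [pvSliceToList]; exact List.take_prefix j p.toList
      have hqe := hnopfx _ hqS hqpfx
      have hlen := congrArg (fun s => s.toList.length) hqe
      simp only [pvSliceToList, List.length_take] at hlen
      omega
    have hstep : pvStepB (PySem.Set.ofList (p :: rest)) PySem.Dict.empty p =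
        PySem.Dict.empty.insert p [] := by
      have hz : pvStepB (PySem.Set.ofList (p :: rest)) PySem.Dict.empty p =
          (if (pvLead (PySem.Set.ofList (p :: rest)) p == p && !((PySem.Dict.empty : PySem.Dict String (List String)).contains p)) = true
           then PySem.Dict.empty.insert p []
           else PySem.Dict.empty.modify (pvLead (PySem.Set.ofList (p :: rest)) p) [] (fun r => r ++ [p])) := rfl
      rw [hz, hlead, PySem.Dict.contains_empty]
      simp
    have hD' : ((PySem.Dict.empty : PySem.Dict String (List String)).insert p []).items =
        [] ++ [(p, [])] :=
      PySem.Dict.items_insert_of_not_contains _ _ (PySem.Dict.contains_empty p)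
    have hkeys' : ((PySem.Dict.empty : PySem.Dict String (List String)).insert p []).keys = [p] := by
      simp only [PySem.Dict.keys, hD', List.nil_append, List.map_cons, List.map_nil]
    have hmain := pvMain (PySem.Set.ofList (p :: rest)) rest [] p []
      (PySem.Dict.empty.insert p []) hD'
      (by rw [hkeys']; exact List.nodup_singleton p)
      (by rw [hkeys']; intro k hk; simp at hk; subst hk; exact (hmem k).2 (by simp))
      (by rw [hkeys']; intro k hk; simp at hk; subst hk; exact hnopfx)
      (by rw [hkeys']; intro k hk; simp at hk; subst hk; exact le_refl _)
      (by
        intro q hq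
        rcases List.mem_cons.1 ((hmem q).1 hq) with rfl | h4
        · exact Or.inl (List.prefix_refl _)
        · exact Or.inr (Or.inr h4))
      (fun u hu => hminhead u (by simp [hu]))
      (fun u hu => (hmem u).2 (by simp [hu]))
      ((List.pairwise_cons.1 hsp).2)
    rw [List.foldl_cons, hstep, hmain]
    simp
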